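-- pv_equiv track=rewrite | github.com/devwuu/coding-test | lecture_1/section7/main24.py | other_solution_2
-- ===== SOURCE A (Python) =====
-- def other_solution_2(nums, k): # o(n) 슬라이딩 윈도우 기법
--     total = sum(nums) # o(n)
--     wn = len(nums) - k # window의 크기 => 사용하는 숫자 빼고 나머지 숫자들이 window가 된다
--     wn_score = 0 # window의 합
--
--     for i in range(wn):
--         wn_score += nums[i]
--
--     minimum = wn_score
--     left = 0
--     for right in range(wn, len(nums)): # window를 하나씩 오른쪽으로 옮긴다.
--         wn_score += (nums[right] - nums[left]) # window를 옮기면 제일 왼쪽 값은 빠지고 오른쪽 값은 들어온다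
--         left += 1
--         minimum = min(minimum, wn_score) # 총계에서 가장 작은 윈도우 값을 빼면 가장 큰 연속 수열 값이 나옴
--
--     return total - minimum
-- ===== SOURCE B (Python) =====
-- def other_solution_2(nums, k):
--     # prefix-sum table; each window sum is a difference of two table entries
--     pre = [0]
--     for x in nums:
--         pre.append(pre[-1] + x)
--     n = len(nums)
--     wn = n - k
--     m = min(pre[i + wn] - pre[i] for i in range(n - wn + 1))
--     return pre[n] - m
-- ===== Notes on version B (the rewrite author's own statement) =====
-- stated objective: alternative
-- what changed: Replaces the incrementally maintained sliding-window sum (add right element, subtract left element, running minimum) by a precomputed prefix-sum table: every window sum is read off as pre[i+wn]-pre[i] in one table-indexed pass.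
import Mathlib
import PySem

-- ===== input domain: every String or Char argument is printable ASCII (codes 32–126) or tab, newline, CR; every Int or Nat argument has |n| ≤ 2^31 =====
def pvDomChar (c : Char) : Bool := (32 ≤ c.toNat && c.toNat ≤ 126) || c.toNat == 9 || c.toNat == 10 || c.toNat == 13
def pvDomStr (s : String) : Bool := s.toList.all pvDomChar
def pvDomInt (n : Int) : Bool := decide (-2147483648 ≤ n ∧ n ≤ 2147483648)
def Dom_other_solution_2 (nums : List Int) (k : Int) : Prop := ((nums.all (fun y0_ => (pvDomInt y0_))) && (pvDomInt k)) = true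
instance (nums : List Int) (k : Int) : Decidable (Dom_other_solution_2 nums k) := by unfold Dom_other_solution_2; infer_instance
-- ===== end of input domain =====

-- B replaces A's incrementally maintained sliding-window sum by a prefix-sum table read
-- in a single indexed pass (alternative decomposition, same O(n) cost).

-- ===== PORT A =====
-- indices are in range under Pre_, so the pyGetD defaults are never used
def other_solution_2 (nums : List Int) (k : Int) : Int :=
  let total := nums.sum
  let wn : Int := (nums.length : Int) - k
  let wn_score :=
    (PySem.List.pyRange 0 wn 1).foldl (fun s i => s + PySem.List.pyGetD nums i 0) 0
  let st :=
    (PySem.List.pyRange wn (nums.length : Int) 1).foldl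
      (fun (st : Int × Int × Int) r =>
        let score := st.1 + (PySem.List.pyGetD nums r 0 - PySem.List.pyGetD nums st.2.1 0)
        (score, st.2.1 + 1, min st.2.2 score))
      (wn_score, 0, wn_score)
  total - st.2.2

-- ===== PORT B =====
-- indices are in range and the min? argument nonempty under Pre_, so the defaults are never used
def other_solution_2_alt (nums : List Int) (k : Int) : Int :=
  let pre := nums.foldl (fun acc x => acc ++ [PySem.List.pyGetD acc (-1) 0 + x]) [0]
  let n : Int := nums.length
  let wn := n - k
  let vals := (PySem.List.pyRange 0 (n - wn + 1) 1).map
      (fun i => PySem.List.pyGetD pre (i + wn) 0 - PySem.List.pyGetD pre i 0)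
  let m := (PySem.List.min? vals (fun x => x)).getD 0
  PySem.List.pyGetD pre n 0 - m

-- ===== PRECONDITION & SPEC =====
-- A raises IndexError on EVERY input outside 0 ≤ k ≤ len(nums) (Pre_ excludes nothing A returns on):
-- for k < 0 the first loop reads nums[wn-1] with wn-1 = len(nums)-k-1 ≥ len(nums); for k > len(nums)
-- the second loop runs k iterations in which left takes the values 0,1,…,k-1, so nums[left] is read at
-- left = len(nums) < k before the loop can finish (and for k > 2·len(nums) an earlier nums[right] with
-- right < -len(nums) already raises) — the negative right indices never let A return there.
def Pre_other_solution_2 (nums : List Int) (k : Int) : Prop :=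
  0 ≤ k ∧ k ≤ (nums.length : Int)
instance (nums : List Int) (k : Int) : Decidable (Pre_other_solution_2 nums k) := by
  unfold Pre_other_solution_2; infer_instance

def pvWitness_other_solution_2 : List Int × Int := ([3, -1, 4, 1, -5], 2)

def Spec_other_solution_2 (nums : List Int) (k : Int) (out : Int) : Prop := out = other_solution_2_alt nums k
instance (nums : List Int) (k : Int) (out : Int) : Decidable (Spec_other_solution_2 nums k out) := by unfold Spec_other_solution_2; infer_instance

-- ===== CLAIM (what is proved, stated in full; the proofs are below) =====
def Claim_equal_other_solution_2 : Prop := ∀ (nums : List Int) (k : Int), Dom_other_solution_2 nums k → Pre_other_solution_2 nums k → Spec_other_solution_2 nums k (other_solution_2 nums k)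

-- ===== LEMMAS AND PROOFS =====

def pref (nums : List Int) (t : Nat) : Int := (nums.take t).sum

lemma pref_cons (x : Int) (xs : List Int) (t : Nat) :
    pref (x :: xs) (t + 1) = x + pref xs t := by
  simp [pref]

lemma pref_succ (nums : List Int) (t : Nat) (h : t < nums.length) :
    pref nums (t + 1) = pref nums t + nums.getD t 0 := by
  have h1 : nums.take (t+1) = nums.take t ++ [nums[t]] := by
    rw [List.take_add_one]; simp [List.getElem?_eq_getElem h]
  rw [pref, pref, h1, List.sum_append]
  simp [List.getD, List.getElem?_eq_getElem h]

def preList (s : Int) : List Int → List Int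
  | [] => []
  | x :: xs => (s + x) :: preList (s + x) xs

lemma preList_get : ∀ (l : List Int) (s : Int) (t : Nat), t < l.length →
    (preList s l)[t]? = some (s + pref l (t + 1))
  | [], _, _, h => by simp at h
  | x :: xs, s, 0, _ => by simp [preList, pref]
  | x :: xs, s, t + 1, h => by
    have ht : t < xs.length := by simpa using h
    rw [preList]
    simp only [List.getElem?_cons_succ, preList_get xs (s + x) t ht, pref_cons]
    congr 1; ring

lemma sumRange (nums : List Int) : ∀ (w : Nat), w ≤ nums.length →
    (PySem.List.pyRange 0 (w : Int) 1).foldl (fun s i => s + PySem.List.pyGetD nums i 0) 0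
      = pref nums w
  | 0, _ => by simp [pref]
  | w + 1, h => by
    have hs : ((w + 1 : Nat) : Int) = (w : Int) + 1 := by push_cast; ring
    rw [hs, PySem.List.pyRange_one_succ_right (by positivity), List.foldl_append,
      sumRange nums w (by omega)]
    simp [pref_succ nums w (by omega)]

def Wf (nums : List Int) (w i : Nat) : Int := pref nums (i + w) - pref nums i

def runMin (nums : List Int) (w : Nat) : Nat → Int
  | 0 => Wf nums w 0
  | j + 1 => min (runMin nums w j) (Wf nums w (j + 1))

lemma foldB : ∀ (l : List Int) (acc : List Int) (x0 : Int),
    l.foldl (fun acc x => acc ++ [PySem.List.pyGetD acc (-1) 0 + x]) (acc ++ [x0])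
      = acc ++ [x0] ++ preList x0 l
  | [], acc, x0 => by simp [preList]
  | x :: xs, acc, x0 => by
    have h1 : PySem.List.pyGetD (acc ++ [x0]) (-1) 0 = x0 :=
      PySem.List.pyGetD_neg_one_append_singleton ..
    simp only [List.foldl_cons, h1, foldB xs (acc ++ [x0]) (x0 + x), preList]
    simp

lemma loopA (nums : List Int) (w : Nat) (hw : w ≤ nums.length) :
    ∀ (j : Nat), j ≤ nums.length - w →
    (PySem.List.pyRange (w : Int) ((w + j : Nat) : Int) 1).foldl
      (fun (st : Int × Int × Int) r =>
        let score := st.1 + (PySem.List.pyGetD nums r 0 - PySem.List.pyGetD nums st.2.1 0)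
        (score, st.2.1 + 1, min st.2.2 score))
      (pref nums w, 0, pref nums w)
      = (Wf nums w j, (j : Int), runMin nums w j)
  | 0, _ => by
    simp [PySem.List.pyRange_one_eq_nil, Wf, runMin, pref]
  | j + 1, h => by
    have hs : ((w + (j + 1) : Nat) : Int) = ((w + j : Nat) : Int) + 1 := by push_cast; ring
    rw [hs, PySem.List.pyRange_one_succ_right (by push_cast; omega),
      List.foldl_append, loopA nums w hw j (by omega)]
    have hW : Wf nums w j + (PySem.List.pyGetD nums ((w + j : Nat) : Int) 0
        - PySem.List.pyGetD nums ((j : Nat) : Int) 0) = Wf nums w (j + 1) := by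
      rw [PySem.List.pyGetD_natCast, PySem.List.pyGetD_natCast]
      have hx : j + 1 + w = j + w + 1 := by omega
      have e1 : pref nums (j + 1 + w) = pref nums (j + w) + nums.getD (j + w) 0 := by
        rw [hx]; exact pref_succ nums (j + w) (by omega)
      have e2 : pref nums (j + 1) = pref nums j + nums.getD j 0 :=
        pref_succ nums j (by omega)
      simp only [Wf, e1, e2]
      have hc : w + j = j + w := by omega
      simp [List.getD]
      rw [hc]; ring
    simp only [List.foldl_cons, List.foldl_nil, runMin]
    refine congrArg₂ _ ?_ (congrArg₂ _ ?_ ?_)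
    · exact hW
    · push_cast; ring
    · rw [hW]

lemma runMin_eq_foldl (nums : List Int) (w : Nat) : ∀ (j : Nat),
    runMin nums w j
      = ((List.range j).map (fun i => Wf nums w (i + 1))).foldl min (Wf nums w 0)
  | 0 => by simp [runMin]
  | j + 1 => by
    rw [runMin, runMin_eq_foldl nums w j, List.range_succ]
    simp

lemma pre_get (nums : List Int) (i : Nat) (h : i ≤ nums.length) :
    (0 :: preList 0 nums)[i]? = some (pref nums i) := by
  cases i with
  | zero => simp [pref]
  | succ t => simpa using preList_get nums 0 t (by omega)

-- ===== VERDICT (by name: the statement is the Claim_ definition above) =====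
theorem other_solution_2_spec : Claim_equal_other_solution_2 := by
  intro nums k _ hpre
  obtain ⟨hk0, hkn⟩ := hpre
  unfold Spec_other_solution_2
  set kn : Nat := k.toNat with hkn'
  set w : Nat := nums.length - kn with hwdef
  have hwn : ((nums.length : Int) - k) = ((w : Int)) := by omega
  have hA : other_solution_2 nums k = nums.sum - runMin nums w kn := by
    unfold other_solution_2
    simp only [hwn]
    rw [sumRange nums w (by omega)]
    have hrange : (nums.length : Int) = ((w + kn : Nat) : Int) := by push_cast; omega
    rw [hrange, loopA nums w (by omega) kn (by omega)]
  have hpl : nums.foldl (fun acc x => acc ++ [PySem.List.pyGetD acc (-1) 0 + x]) [0]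
      = 0 :: preList 0 nums := by simpa using foldB nums [] 0
  have hB : other_solution_2_alt nums k = nums.sum - runMin nums w kn := by
    unfold other_solution_2_alt
    simp only [hpl]
    have hnw : ((nums.length : Int) - ((nums.length : Int) - k) + 1) = ((kn + 1 : Nat) : Int) := by
      push_cast; omega
    rw [hnw, hwn]
    have hvals : (PySem.List.pyRange 0 ((kn + 1 : Nat) : Int) 1).map
        (fun i => PySem.List.pyGetD (0 :: preList 0 nums) (i + (w : Int)) 0
          - PySem.List.pyGetD (0 :: preList 0 nums) i 0)
        = (List.range (kn + 1)).map (fun i => Wf nums w i) := by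
      rw [PySem.List.pyRange_zero_natCast, List.map_map]
      apply List.map_congr_left
      intro i hi
      have hi' : i < kn + 1 := List.mem_range.mp hi
      have c1 : ((i : Int) + (w : Int)) = ((i + w : Nat) : Int) := by push_cast; ring
      have g1 : PySem.List.pyGetD (0 :: preList 0 nums) ((i + w : Nat) : Int) 0
          = pref nums (i + w) := by
        rw [PySem.List.pyGetD_natCast]
        simp [List.getD, pre_get nums (i + w) (by omega)]
      have g2 : PySem.List.pyGetD (0 :: preList 0 nums) ((i : Nat) : Int) 0
          = pref nums i := by
        rw [PySem.List.pyGetD_natCast]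
        simp [List.getD, pre_get nums i (by omega)]
      simp only [Function.comp_apply, c1, g1, g2, Wf]
    rw [hvals]
    have hcons : (List.range (kn + 1)).map (fun i => Wf nums w i)
        = Wf nums w 0 :: (List.range kn).map (fun i => Wf nums w (i + 1)) := by
      rw [List.range_succ_eq_map]
      simp [Function.comp]
    rw [hcons, PySem.List.min?_id_cons]
    have glast : PySem.List.pyGetD (0 :: preList 0 nums) (nums.length : Int) 0
        = pref nums nums.length := by
      rw [PySem.List.pyGetD_natCast]
      simp [List.getD, pre_get nums nums.length (le_refl _)]
    rw [glast]
    have hsum : pref nums nums.length = nums.sum := by simp [pref]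
    rw [hsum, ← runMin_eq_foldl]
    simp
  rw [hA, hB]
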